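-- pv_equiv track=rewrite | github.com/prakharmishra2002/GFG-POTD-Solution | August 2025/09.py | getLongestPrefix
-- ===== SOURCE A (Python) =====
-- def getLongestPrefix(s: str) -> int:
--     n = len(s)
--     if n <= 1:
--         return -1
--
--     # Build Z-array: z[i] = longest substring starting at i
--     # that matches a prefix of s
--     z = [0] * n
--     l = r = 0
--     for i in range(1, n):
--         if i <= r:
--             # mirror within [l..r]
--             z[i] = min(r - i + 1, z[i - l])
--         # extend match past r
--         while i + z[i] < n and s[z[i]] == s[i + z[i]]:
--             z[i] += 1
--         if i + z[i] - 1 > r: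
--             l, r = i, i + z[i] - 1
--
--     # Scan from longest possible proper prefix downwards
--     for length in range(n - 1, 0, -1):
--         # if z[length] covers the rest of the string,
--         # repeating the prefix of this length will match s
--         if z[length] >= n - length:
--             return length
--
--     return -1
-- ===== SOURCE B (Python) =====
-- def getLongestPrefix(s: str) -> int:
--     # Scan border lengths upward: the first b with s[:b] == s[n-b:] is the
--     # smallest border, and the answer is n - b (the original's returned index).
--     n = len(s)
--     for b in range(1, n):
--         if s[:b] == s[n - b:]:
--             return n - b
--     return -1
-- ===== Notes on version B (the rewrite author's own statement) =====
-- stated objective: simpler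
-- what changed: Drops the Z-array entirely: B scans candidate border lengths upward and returns n minus the first (smallest) b whose length-b prefix equals the length-b suffix, via direct slice comparison.
import Mathlib
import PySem

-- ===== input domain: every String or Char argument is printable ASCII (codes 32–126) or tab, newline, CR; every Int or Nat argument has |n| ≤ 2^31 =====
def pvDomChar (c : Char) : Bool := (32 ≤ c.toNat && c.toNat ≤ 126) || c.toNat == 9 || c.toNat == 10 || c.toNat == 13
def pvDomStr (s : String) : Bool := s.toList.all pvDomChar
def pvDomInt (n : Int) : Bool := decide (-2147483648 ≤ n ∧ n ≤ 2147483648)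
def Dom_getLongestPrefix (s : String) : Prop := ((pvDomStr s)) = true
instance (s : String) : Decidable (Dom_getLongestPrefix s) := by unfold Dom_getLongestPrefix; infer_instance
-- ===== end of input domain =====

-- B replaces the Z-array with a direct ascending scan for the smallest border (simpler, not faster).

-- ===== PORT A =====
-- the inner `while i + z[i] < n and s[z[i]] == s[i + z[i]]: z[i] += 1` loop
-- (in-range indexing, ported with getD)
def pvExtend (cs : List Char) (i : Nat) (z : Nat) : Nat :=
  if h : i + z < cs.length ∧ cs.getD z ' ' = cs.getD (i + z) ' ' then
    pvExtend cs i (z + 1)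
  else z
termination_by cs.length - (i + z)
decreasing_by omega

-- the `for i in range(1, n)` loop building the Z-array, state (z, l, r)
def pvZLoop (cs : List Char) (i : Nat) (zs : List Nat) (l r : Nat) : List Nat :=
  if h : i < cs.length then
    let m := if i ≤ r then min (r - i + 1) (zs.getD (i - l) 0) else 0
    let zi := pvExtend cs i m
    let zs' := zs.set i zi
    if i + zi - 1 > r then pvZLoop cs (i + 1) zs' i (i + zi - 1)
    else pvZLoop cs (i + 1) zs' l r
  else zs
termination_by cs.length - i

-- the `for length in range(n - 1, 0, -1)` scan
def pvScanA (zs : List Nat) (n : Nat) : Nat → Int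
  | 0 => -1
  | k + 1 => if n - (k + 1) ≤ zs.getD (k + 1) 0 then ((k : Int) + 1) else pvScanA zs n k

def getLongestPrefix (s : String) : Int :=
  let cs := s.toList
  let n := cs.length
  if n ≤ 1 then -1
  else pvScanA (pvZLoop cs 1 (List.replicate n 0) 0 0) n (n - 1)

-- ===== PORT B =====
-- the `for b in range(1, n)` loop; slices s[:b] and s[n-b:] (0 ≤ b ≤ n) are take/drop exactly
def pvScanB (cs : List Char) (b : Nat) : Int :=
  if h : b < cs.length then
    if cs.take b = cs.drop (cs.length - b) then (cs.length : Int) - (b : Int)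
    else pvScanB cs (b + 1)
  else -1
termination_by cs.length - b

def getLongestPrefix_alt (s : String) : Int := pvScanB s.toList 1

-- ===== PRECONDITION & SPEC =====
def Spec_getLongestPrefix (s : String) (out : Int) : Prop := out = getLongestPrefix_alt s
instance (s : String) (out : Int) : Decidable (Spec_getLongestPrefix s out) := by unfold Spec_getLongestPrefix; infer_instance

-- ===== CLAIM (what is proved, stated in full; the proofs are below) =====
def Claim_equal_getLongestPrefix : Prop := ∀ (s : String), Dom_getLongestPrefix s → Spec_getLongestPrefix s (getLongestPrefix s)

-- ===== LEMMAS AND PROOFS =====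

-- length of the longest common prefix of two lists
def pvLcp : List Char → List Char → Nat
  | a :: as, b :: bs => if a = b then pvLcp as bs + 1 else 0
  | _, _ => 0

-- the value the Z-array holds at index i: lcp of s and s[i:]
def pvZ (cs : List Char) (i : Nat) : Nat := pvLcp cs (cs.drop i)

theorem pvLcp_le_right (a b : List Char) : pvLcp a b ≤ b.length := by
  induction a generalizing b with
  | nil => cases b <;> simp [pvLcp]
  | cons x as ih =>
    cases b with
    | nil => simp [pvLcp]
    | cons y bs =>
      simp only [pvLcp]
      split <;> simp [Nat.succ_le_succ (ih bs)]

theorem pvLcp_getD (a b : List Char) (d : Char) :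
    ∀ j, j < pvLcp a b → a.getD j d = b.getD j d := by
  induction a generalizing b with
  | nil => cases b <;> simp [pvLcp]
  | cons x as ih =>
    cases b with
    | nil => simp [pvLcp]
    | cons y bs =>
      intro j hj
      simp only [pvLcp] at hj
      by_cases hxy : x = y
      · simp only [hxy, if_true] at hj
        cases j with
        | zero => simp [hxy]
        | succ j' => simpa using ih bs j' (by omega)
      · simp [hxy] at hj
      
theorem pvLcp_ne (a b : List Char) (d : Char)
    (ha : pvLcp a b < a.length) (hb : pvLcp a b < b.length) :
    a.getD (pvLcp a b) d ≠ b.getD (pvLcp a b) d := by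
  induction a generalizing b with
  | nil => simp at ha
  | cons x as ih =>
    cases b with
    | nil => simp at hb
    | cons y bs =>
      by_cases hxy : x = y
      · subst hxy
        have hred : pvLcp (x :: as) (x :: bs) = pvLcp as bs + 1 := by simp [pvLcp]
        rw [hred] at ha hb ⊢
        simp only [List.length_cons] at ha hb
        simp only [List.getD_cons_succ]
        exact ih bs (by omega) (by omega)
      · simp only [pvLcp, if_neg hxy, List.getD_cons_zero]
        exact hxy

theorem pvLcp_ge (a b : List Char) (d : Char) (k : Nat)
    (hka : k ≤ a.length) (hkb : k ≤ b.length)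
    (hag : ∀ j, j < k → a.getD j d = b.getD j d) : k ≤ pvLcp a b := by
  induction a generalizing b k with
  | nil =>
    have hk0 : k = 0 := by simpa using hka
    subst hk0
    exact Nat.zero_le _
  | cons x as ih =>
    cases b with
    | nil =>
      have hk0 : k = 0 := by simpa using hkb
      subst hk0
      exact Nat.zero_le _
    | cons y bs =>
      cases k with
      | zero => exact Nat.zero_le _
      | succ k' =>
        have hxy : x = y := by simpa using hag 0 (by omega)
        have : k' ≤ pvLcp as bs := by
          refine ih bs k' (by simpa using hka) (by simpa using hkb) ?_
          intro j hj
          simpa using hag (j + 1) (by omega)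
        simp only [pvLcp, hxy, if_true]
        omega

theorem pvLcp_ge_len_iff (a b : List Char) :
    b.length ≤ pvLcp a b ↔ b = a.take b.length := by
  induction a generalizing b with
  | nil =>
    cases b with
    | nil => simp [pvLcp]
    | cons y bs => simp [pvLcp]
  | cons x as ih =>
    cases b with
    | nil => simp [pvLcp]
    | cons y bs =>
      simp only [pvLcp]
      by_cases hxy : x = y
      · subst hxy
        simp only [if_true, List.length_cons, List.take_succ_cons]
        constructor
        · intro h
          have := (ih bs).mp (by omega)
          simpa using this
        · intro h
          have : bs = as.take bs.length := by simpa using h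
          have := (ih bs).mpr this
          omega
      · simp only [if_neg hxy]
        constructor
        · intro h; simp at h
        · intro h
          have : y = x := by simpa using congrArg (fun l => l.headD ' ') h
          exact absurd this.symm hxy

theorem pvLcp_self (a : List Char) : pvLcp a a = a.length := by
  induction a with
  | nil => simp [pvLcp]
  | cons x as ih => simp [pvLcp, ih]

theorem pvGetD_drop (cs : List Char) (i j : Nat) (d : Char) :
    (cs.drop i).getD j d = cs.getD (i + j) d := by
  simp [List.getD_eq_getElem?_getD, List.getElem?_drop]

theorem pvZ_le (cs : List Char) (i : Nat) : pvZ cs i ≤ cs.length - i := by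
  have := pvLcp_le_right cs (cs.drop i)
  simpa [pvZ] using this

theorem pvZ_agree (cs : List Char) (i : Nat) (d : Char) :
    ∀ j, j < pvZ cs i → cs.getD j d = cs.getD (i + j) d := by
  intro j hj
  have := pvLcp_getD cs (cs.drop i) d j hj
  rwa [pvGetD_drop] at this

theorem pvZ_ge (cs : List Char) (i m : Nat) (hm : m ≤ cs.length - i)
    (hag : ∀ k, k < m → cs.getD k ' ' = cs.getD (i + k) ' ') : m ≤ pvZ cs i := by
  refine pvLcp_ge cs (cs.drop i) ' ' m (by omega) (by simpa using hm) ?_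
  intro j hj
  rw [pvGetD_drop]
  exact hag j hj

theorem pvZ_ge_iff (cs : List Char) (k : Nat) :
    cs.length - k ≤ pvZ cs k ↔ cs.drop k = cs.take (cs.length - k) := by
  have h := pvLcp_ge_len_iff cs (cs.drop k)
  simpa [pvZ, List.length_drop] using h

-- the while-loop computes pvZ from any start value below it
theorem pvExtend_eq (cs : List Char) (i : Nat) :
    ∀ c, c ≤ pvZ cs i → pvExtend cs i c = pvZ cs i := by
  intro c hc
  have hd : pvZ cs i - c + c = pvZ cs i := by omega
  generalize hgen : pvZ cs i - c = dfuel at hd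
  clear hc hgen
  induction dfuel generalizing c with
  | zero =>
    rw [pvExtend]
    split_ifs with h
    · exfalso
      obtain ⟨hlt, heq⟩ := h
      have hc' : c = pvZ cs i := by omega
      have hzr : pvLcp cs (cs.drop i) = pvZ cs i := rfl
      have hza : pvZ cs i ≤ cs.length - i := pvZ_le cs i
      have hne := pvLcp_ne cs (cs.drop i) ' '
        (by rw [hzr]; omega) (by rw [List.length_drop, hzr]; omega)
      rw [pvGetD_drop, hzr] at hne
      exact hne (hc' ▸ heq)
    · omega
  | succ d ih =>
    have hclt : c < pvZ cs i := by omega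
    rw [pvExtend]
    have hcond : i + c < cs.length ∧ cs.getD c ' ' = cs.getD (i + c) ' ' := by
      constructor
      · have := pvZ_le cs i
        omega
      · exact pvZ_agree cs i ' ' c hclt
    rw [dif_pos hcond]
    exact ih (c + 1) (by omega)

-- loop invariant: once past index i the array holds pvZ at 1..i-1, zeros elsewhere,
-- and (l, r) is a valid Z-box
theorem pvZLoop_getD (cs : List Char) :
    ∀ fuel i zs l r, cs.length - i ≤ fuel → 1 ≤ i → l < i → r < cs.length →
      zs.length = cs.length →
      (∀ j, j < cs.length → zs.getD j 0 = if 1 ≤ j ∧ j < i then pvZ cs j else 0) →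
      (l ≤ r → r - l + 1 ≤ pvZ cs l) →
      ∀ j, 1 ≤ j → j < cs.length → (pvZLoop cs i zs l r).getD j 0 = pvZ cs j := by
  intro fuel
  induction fuel with
  | zero =>
    intro i zs l r hfuel hi hl hr hlen hzs hbox j hj1 hj2
    rw [pvZLoop, dif_neg (by omega)]
    rw [hzs j hj2, if_pos (show 1 ≤ j ∧ j < i from ⟨hj1, by omega⟩)]
  | succ f ih =>
    intro i zs l r hfuel hi hl hr hlen hzs hbox j hj1 hj2
    by_cases hin : i < cs.length
    · rw [pvZLoop, dif_pos hin]
      -- the mirror start value is ≤ pvZ cs i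
      have hm : (if i ≤ r then min (r - i + 1) (zs.getD (i - l) 0) else 0) ≤ pvZ cs i := by
        split_ifs with hir
        · by_cases hl0 : l = 0
          · subst hl0
            have : zs.getD (i - 0) 0 = 0 := by
              rw [Nat.sub_zero, hzs i hin, if_neg (by omega : ¬(1 ≤ i ∧ i < i))]
            rw [this]
            simp
          · -- 1 ≤ i - l < i : mirror from pvZ (i - l)
            have h1 : 1 ≤ i - l := by omega
            have h2 : i - l < i := by omega
            have hz : zs.getD (i - l) 0 = pvZ cs (i - l) := by
              rw [hzs (i - l) (by omega), if_pos (show 1 ≤ i - l ∧ i - l < i from ⟨h1, h2⟩)]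
            rw [hz]
            refine pvZ_ge cs i _ ?_ ?_
            · have := min_le_left (r - i + 1) (pvZ cs (i - l))
              omega
            intro k hk
            have hk1 : k < pvZ cs (i - l) := lt_of_lt_of_le hk (min_le_right _ _)
            have hk2 : k < r - i + 1 := lt_of_lt_of_le hk (min_le_left _ _)
            have hbox' := hbox (by omega)
            have e1 : cs.getD k ' ' = cs.getD ((i - l) + k) ' ' :=
              pvZ_agree cs (i - l) ' ' k hk1
            have e2 : cs.getD ((i - l) + k) ' ' = cs.getD (l + ((i - l) + k)) ' ' :=
              pvZ_agree cs l ' ' ((i - l) + k) (by omega)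
            have e3 : l + ((i - l) + k) = i + k := by omega
            rw [e1, e2, e3]
        · omega
      have hzi : pvExtend cs i (if i ≤ r then min (r - i + 1) (zs.getD (i - l) 0) else 0)
          = pvZ cs i := pvExtend_eq cs i _ hm
      show (if i + pvExtend cs i (if i ≤ r then min (r - i + 1) (zs.getD (i - l) 0) else 0) - 1 > r
            then pvZLoop cs (i + 1)
              (zs.set i (pvExtend cs i (if i ≤ r then min (r - i + 1) (zs.getD (i - l) 0) else 0)))
              i (i + pvExtend cs i (if i ≤ r then min (r - i + 1) (zs.getD (i - l) 0) else 0) - 1)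
            else pvZLoop cs (i + 1)
              (zs.set i (pvExtend cs i (if i ≤ r then min (r - i + 1) (zs.getD (i - l) 0) else 0)))
              l r).getD j 0 = pvZ cs j
      rw [hzi]
      have hzle := pvZ_le cs i
      have hzs' : ∀ j', j' < cs.length →
          (zs.set i (pvZ cs i)).getD j' 0 = if 1 ≤ j' ∧ j' < i + 1 then pvZ cs j' else 0 := by
        intro j' hj'
        by_cases hji : j' = i
        · subst hji
          rw [List.getD_eq_getElem?_getD, List.getElem?_set_self (by omega)]
          rw [if_pos (show 1 ≤ j' ∧ j' < j' + 1 from ⟨by omega, by omega⟩)]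
          rfl
        · rw [List.getD_eq_getElem?_getD, List.getElem?_set_ne (by omega),
            ← List.getD_eq_getElem?_getD, hzs j' hj']
          by_cases h1 : 1 ≤ j' ∧ j' < i
          · rw [if_pos h1, if_pos (show 1 ≤ j' ∧ j' < i + 1 from ⟨h1.1, by omega⟩)]
          · rw [if_neg h1, if_neg (by omega)]
      split_ifs with hupd
      · -- box updated to (i, i + zi - 1)
        refine ih (i + 1) _ i (i + pvZ cs i - 1) (by omega) (by omega) (by omega)
          (by omega) (by simpa using hlen) hzs' ?_ j hj1 hj2
        intro hle
        have : i + pvZ cs i - 1 - i + 1 = pvZ cs i := by omega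
        omega
      · -- box unchanged
        exact ih (i + 1) _ l r (by omega) (by omega) (by omega) hr
          (by simpa using hlen) hzs' hbox j hj1 hj2
    · rw [pvZLoop, dif_neg hin]
      rw [hzs j hj2, if_pos (show 1 ≤ j ∧ j < i from ⟨hj1, by omega⟩)]

-- A's descending scan over z equals B's ascending border scan, via b = n - k
theorem pvScan_eq (cs : List Char) (zs : List Nat)
    (hz : ∀ j, 1 ≤ j → j < cs.length → zs.getD j 0 = pvZ cs j) :
    ∀ k, k < cs.length → pvScanA zs cs.length k = pvScanB cs (cs.length - k) := by
  intro k
  induction k with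
  | zero =>
    intro _
    rw [pvScanA, pvScanB]
    simp
  | succ k ihk =>
    intro hk
    set n := cs.length with hn
    rw [pvScanA, pvScanB]
    have hb : n - (k + 1) < n := by omega
    rw [dif_pos hb]
    have hdk : n - (n - (k + 1)) = k + 1 := by omega
    have hcond : (n - (k + 1) ≤ zs.getD (k + 1) 0)
        ↔ (cs.take (n - (k + 1)) = cs.drop (n - (n - (k + 1)))) := by
      rw [hz (k + 1) (by omega) hk, hdk]
      have := pvZ_ge_iff cs (k + 1)
      constructor
      · intro h; exact ((this.mp h)).symm
      · intro h; exact this.mpr h.symm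
    by_cases hA : n - (k + 1) ≤ zs.getD (k + 1) 0
    · rw [if_pos hA, if_pos (hcond.mp hA)]
      omega
    · rw [if_neg hA, if_neg (fun hB => hA (hcond.mpr hB))]
      rw [show n - (k + 1) + 1 = n - k from by omega]
      exact ihk (by omega)

theorem getLongestPrefix_eq_alt (s : String) : getLongestPrefix s = getLongestPrefix_alt s := by
  unfold getLongestPrefix getLongestPrefix_alt
  set cs := s.toList with hcs
  set n := cs.length with hn
  by_cases hn1 : n ≤ 1
  · rw [if_pos hn1, pvScanB, dif_neg (by omega)]
  · rw [if_neg hn1]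
    have hzfinal := pvZLoop_getD cs (cs.length - 1) 1 (List.replicate n 0) 0 0
      (by omega) (by omega) (by omega) (by omega)
      (by simpa using hn) ?_ ?_
    · have hscan := pvScan_eq cs (pvZLoop cs 1 (List.replicate n 0) 0 0)
        (fun j hj1 hj2 => hzfinal j hj1 hj2) (n - 1) (by omega)
      rw [hscan, show cs.length - (n - 1) = 1 from by omega]
    · intro j hj
      simp only [List.getD_eq_getElem?_getD, List.getElem?_replicate]
      rw [if_pos (by omega)]
      simp only [Option.getD_some]
      rw [if_neg (by omega)]
    · intro _
      have : pvZ cs 0 = n := by simpa [pvZ] using pvLcp_self cs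
      omega

-- ===== VERDICT (by name: the statement is the Claim_ definition above) =====
theorem getLongestPrefix_spec : Claim_equal_getLongestPrefix := by
  intro s _
  unfold Spec_getLongestPrefix
  exact getLongestPrefix_eq_alt s
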